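-- pv_equiv track=rewrite | github.com/lran2008/smcrun | ms2smc.py | phasecombs
-- ===== SOURCE A (Python) =====
-- def phases(gt):
-- # diploid allele combinations
-- 	yield(gt)
-- 	if gt[0] != gt[1]:
-- 		yield(gt[::-1])
--
-- def phasecombs(gts, sep = ''):
-- # different phase combinations of diploid genotypes in gts
-- 	if len(gts) > 1:
-- 		for cc in phasecombs(gts[1:], sep):
-- 			for ph in phases(gts[0]):
-- 				yield(sep.join((ph + cc)))
-- 	else:
-- 		for ph in phases(gts[0]):
-- 			yield(ph)
-- ===== SOURCE B (Python) =====
-- def phases(gt):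
-- # diploid allele combinations
-- 	yield gt
-- 	if gt[0] != gt[1]:
-- 		yield gt[::-1]
--
-- def phasecombs(gts, sep = ''):
-- # iterative fold from the last genotype backwards instead of recursion
-- 	acc = list(phases(gts[-1]))
-- 	for gt in reversed(gts[:-1]):
-- 		acc = [sep.join(ph + cc) for cc in acc for ph in phases(gt)]
-- 	yield from acc
-- ===== Notes on version B (the rewrite author's own statement) =====
-- stated objective: alternative
-- what changed: Replaces A's recursion on the list head with an iterative backwards fold: B seeds an accumulator with the phases of the last genotype and folds the remaining genotypes in reverse, rebuilding the combination list level by level; same repeated sep.join(ph + cc) per level, so outputs match exactly.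
import Mathlib
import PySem

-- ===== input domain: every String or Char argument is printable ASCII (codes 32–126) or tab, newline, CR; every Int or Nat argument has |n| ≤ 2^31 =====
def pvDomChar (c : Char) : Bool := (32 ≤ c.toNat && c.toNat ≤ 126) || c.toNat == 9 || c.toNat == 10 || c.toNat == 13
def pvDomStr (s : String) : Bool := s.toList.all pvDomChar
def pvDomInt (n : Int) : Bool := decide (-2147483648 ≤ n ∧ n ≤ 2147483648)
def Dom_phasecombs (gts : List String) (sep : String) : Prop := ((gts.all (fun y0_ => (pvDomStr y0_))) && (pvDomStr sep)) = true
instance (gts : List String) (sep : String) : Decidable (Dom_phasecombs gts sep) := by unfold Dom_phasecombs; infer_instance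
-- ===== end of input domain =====

-- B replaces A's head recursion with an iterative backwards fold over the genotype list (alternative decomposition, same cost).

-- ===== PORT A =====
-- shared helper: Python's `phases(gt)` generator, materialised ([gt] or [gt, reversed gt]);
-- identical in Source A and Source B.  The `| _, _ => [gt]` arm is where Python raises IndexError (len(gt) < 2), outside Pre_.
def phases (gt : String) : List String :=
  match PySem.Str.pyGet? gt 0, PySem.Str.pyGet? gt 1 with
  | some c0, some c1 =>
      if c0 ≠ c1 then
        match PySem.Str.slice? gt none none (-1) with  -- gt[::-1]
        | some r => [gt, r]
        | none => [gt]
      else [gt]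
  | _, _ => [gt]

-- sep.join(ph + cc): Python joins the CHARACTERS of the concatenated string with sep (exact via PySem.Chars.join)
def joinPhase (sep ph cc : String) : String :=
  String.ofList (PySem.Chars.join sep.toList ((ph.toList ++ cc.toList).map (fun c => [c])))

-- `len(gts) > 1` becomes the two-or-more-elements pattern; `[]` is where Python raises IndexError (outside Pre_)
def phasecombs : List String → String → List String
  | [], _ => []
  | [g], _ => phases g
  | g :: r :: t, sep =>
      (phasecombs (r :: t) sep).flatMap (fun cc => (phases g).map (fun ph => joinPhase sep ph cc))

-- ===== PORT B =====
-- gts[-1] via pyGet? (none = IndexError, outside Pre_); acc seeded with phases(last);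
-- then a left fold over reversed(gts[:-1]), each step the comprehension [sep.join(ph+cc) for cc in acc for ph in phases(gt)]
def phasecombs_alt (gts : List String) (sep : String) : List String :=
  match PySem.List.pyGet? gts (-1) with
  | none => []
  | some last =>
      ((PySem.List.slice gts none (some (-1))).reverse).foldl
        (fun acc gt => acc.flatMap (fun cc => (phases gt).map (fun ph => joinPhase sep ph cc)))
        (phases last)

-- ===== PRECONDITION & SPEC =====
-- Pre_ excludes exactly the inputs where Python A raises IndexError: an empty list (gts[0]),
-- or a genotype string of length < 2 (gt[0]/gt[1] inside phases).
def Pre_phasecombs (gts : List String) (sep : String) : Prop :=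
  gts ≠ [] ∧ ∀ g ∈ gts, 2 ≤ g.toList.length
instance (gts : List String) (sep : String) : Decidable (Pre_phasecombs gts sep) := by unfold Pre_phasecombs; infer_instance
def pvWitness_phasecombs : List String × String := (["AB", "CC"], "-")

def Spec_phasecombs (gts : List String) (sep : String) (out : List String) : Prop := out = phasecombs_alt gts sep
instance (gts : List String) (sep : String) (out : List String) : Decidable (Spec_phasecombs gts sep out) := by unfold Spec_phasecombs; infer_instance

-- ===== CLAIM (what is proved, stated in full; the proofs are below) =====
def Claim_equal_phasecombs : Prop := ∀ (gts : List String) (sep : String), Dom_phasecombs gts sep → Pre_phasecombs gts sep → Spec_phasecombs gts sep (phasecombs gts sep)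

-- ===== LEMMAS AND PROOFS =====

theorem alt_singleton (g : String) (sep : String) : phasecombs_alt [g] sep = phases g := by
  simp [phasecombs_alt, PySem.List.pyGet?_neg_one, PySem.List.slice_to_neg_one]

theorem alt_cons (g r : String) (t : List String) (sep : String) :
    phasecombs_alt (g :: r :: t) sep
      = (phasecombs_alt (r :: t) sep).flatMap (fun cc => (phases g).map (fun ph => joinPhase sep ph cc)) := by
  simp [phasecombs_alt, PySem.List.pyGet?_neg_one, PySem.List.slice_to_neg_one,
        List.dropLast_cons_of_ne_nil, List.foldl_append]
  cases (r :: t).getLast? <;> simp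

-- ===== VERDICT (by name: the statement is the Claim_ definition above) =====
theorem phasecombs_spec : Claim_equal_phasecombs := by
  intro gts sep
  unfold Spec_phasecombs
  induction gts with
  | nil => intro _ _; simp [phasecombs, phasecombs_alt, PySem.List.pyGet?]
  | cons g rest ih =>
      intro hd hp
      cases rest with
      | nil => simp [phasecombs, alt_singleton]
      | cons r t =>
          rw [phasecombs, alt_cons, ih ?_ ?_]
          · simp only [Dom_phasecombs, List.all_cons, Bool.and_eq_true] at hd ⊢
            tauto
          · exact ⟨by simp, fun x hx => hp.2 x (List.mem_cons_of_mem _ hx)⟩
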